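-- pv_equiv track=rewrite | github.com/adasiekkk/exercises_python_SoSe2025 | exercise8.py | vokon_zahlen
-- ===== SOURCE A (Python) =====
-- def vokon_zahlen(x):
--     vowel=0
--     consonant=0
--     x=x.lower()
--     for buchstabe in x:
--         if buchstabe.isalpha():
--             if buchstabe in "aeiou":
--                 vowel=vowel+1
--             else:
--                 consonant=consonant+1
--     return vowel, consonant
-- ===== SOURCE B (Python) =====
-- def vokon_zahlen(x):
--     x = x.lower()
--     alpha = sum(1 for c in x if c.isalpha())
--     vowels = sum(1 for c in x if c in "aeiou")
--     return vowels, alpha - vowels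
-- ===== Notes on version B (the rewrite author's own statement) =====
-- stated objective: alternative
-- what changed: B makes two whole-string counting passes (alphabetic total and vowel count) and derives the consonant count by subtraction, instead of A's single loop accumulating vowels and consonants in nested if/else branches.
import Mathlib
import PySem

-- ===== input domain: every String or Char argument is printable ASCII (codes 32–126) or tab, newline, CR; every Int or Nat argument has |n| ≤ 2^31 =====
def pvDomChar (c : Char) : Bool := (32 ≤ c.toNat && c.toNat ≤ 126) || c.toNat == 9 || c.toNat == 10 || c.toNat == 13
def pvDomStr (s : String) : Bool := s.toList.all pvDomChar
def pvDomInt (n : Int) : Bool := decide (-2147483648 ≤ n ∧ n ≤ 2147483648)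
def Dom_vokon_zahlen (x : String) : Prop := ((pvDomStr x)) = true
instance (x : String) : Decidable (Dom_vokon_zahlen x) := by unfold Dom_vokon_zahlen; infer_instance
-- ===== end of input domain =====

-- B counts alphabetic characters and vowels in two passes and derives consonants by
-- subtraction, instead of A's single loop with an if/else accumulator pair (objective: alternative).

-- ===== PORT A =====
def vokon_zahlen (x : String) : Int × Int :=
  let cs := (PySem.Str.lower x).toList
  cs.foldl (fun (p : Int × Int) buchstabe =>
    if PySem.Chars.isalpha buchstabe then
      if PySem.Chars.isIn [buchstabe] (['a','e','i','o','u'] : List Char) then (p.1 + 1, p.2)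
      else (p.1, p.2 + 1)
    else p) (0, 0)

-- ===== PORT B =====
def vokon_zahlen_alt (x : String) : Int × Int :=
  let cs := (PySem.Str.lower x).toList
  let alpha : Int := (cs.countP (fun c => PySem.Chars.isalpha c) : Int)
  let vowels : Int := (cs.countP (fun c => PySem.Chars.isIn [c] (['a','e','i','o','u'] : List Char)) : Int)
  (vowels, alpha - vowels)

-- ===== PRECONDITION & SPEC =====
def Spec_vokon_zahlen (x : String) (out : Int × Int) : Prop := out = vokon_zahlen_alt x
instance (x : String) (out : Int × Int) : Decidable (Spec_vokon_zahlen x out) := by unfold Spec_vokon_zahlen; infer_instance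

-- ===== CLAIM (what is proved, stated in full; the proofs are below) =====
def Claim_equal_vokon_zahlen : Prop := ∀ (x : String), Dom_vokon_zahlen x → Spec_vokon_zahlen x (vokon_zahlen x)

-- ===== LEMMAS AND PROOFS =====

theorem pv_vowel_alpha (c : Char) (h : PySem.Chars.isIn [c] (['a','e','i','o','u'] : List Char) = true) :
    PySem.Chars.isalpha c = true := by
  rw [PySem.Chars.isIn_iff_infix] at h
  have hm : c ∈ (['a','e','i','o','u'] : List Char) := List.singleton_sublist.mp h.sublist
  fin_cases hm <;> decide

theorem pv_fold (cs : List Char) (v k : Int) :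
    cs.foldl (fun (p : Int × Int) buchstabe =>
      if PySem.Chars.isalpha buchstabe then
        if PySem.Chars.isIn [buchstabe] (['a','e','i','o','u'] : List Char) then (p.1 + 1, p.2)
        else (p.1, p.2 + 1)
      else p) (v, k)
    = (v + (cs.countP (fun c => PySem.Chars.isIn [c] (['a','e','i','o','u'] : List Char)) : Int),
       k + ((cs.countP (fun c => PySem.Chars.isalpha c) : Int)
            - (cs.countP (fun c => PySem.Chars.isIn [c] (['a','e','i','o','u'] : List Char)) : Int))) := by
  induction cs generalizing v k with
  | nil => simp
  | cons c cs ih =>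
    by_cases ha : PySem.Chars.isalpha c = true
    · by_cases hv : PySem.Chars.isIn [c] (['a','e','i','o','u'] : List Char) = true
      · simp [List.foldl_cons, ha, hv, ih, Prod.ext_iff]
        omega
      · simp [List.foldl_cons, ha, hv, ih, Prod.ext_iff]
        omega
    · have hv : ¬ PySem.Chars.isIn [c] (['a','e','i','o','u'] : List Char) = true := fun h => ha (pv_vowel_alpha c h)
      simp [List.foldl_cons, ha, hv, ih]

-- ===== VERDICT (by name: the statement is the Claim_ definition above) =====
theorem vokon_zahlen_spec : Claim_equal_vokon_zahlen := by
  intro x _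
  unfold Spec_vokon_zahlen vokon_zahlen vokon_zahlen_alt
  rw [pv_fold]
  simp
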